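-- pv_equiv track=rewrite | github.com/caose-lab/hab-forecasting-SJL | src/chl_forecast/forecasting.py | _feature_profile_columns
-- ===== SOURCE A (Python) =====
-- WEEK1_SMALL_ENV_COLUMNS = (
--     "precipitation",
--     "air_temperature",
--     "water_temperature",
--     "water_level",
-- )
--
-- WEEK2_SMALL_ENV_COLUMNS = WEEK1_SMALL_ENV_COLUMNS + ("Watt_per_m2", "AWND", "tidal_range")
--
-- WEEK3_PRUNED_EXCLUDED_PREFIXES = (
--     "OWC",
--     "acdm_443",
--     "acdom_443",
--     "anw_443",
--     "aphy_443",
--     "bbp_443",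
--     "bbp_slope",
--     "iop_flags",
--     "kd_490",
--     "target_delta_",
-- )
--
-- WEEK3_COMPACT_EXCLUDED_PREFIXES = WEEK3_PRUNED_EXCLUDED_PREFIXES + (
--     "Oa",
--     "A865",
--     "ADG443_NN",
--     "KD490_M07",
--     "PAR",
--     "TSM_NN",
--     "rho_665",
--     "rho_681",
--     "rho_709",
--     "IWV",
--     "total_pixels",
--     "valid_pixels",
--     "CI_index",
-- )
--
-- def _feature_profile_columns(feature_columns: list[str], profile: str) -> list[str]:
--     selected: list[str] = []
--     for column in feature_columns:
--         is_target = column.startswith("CHLL_NN_TOTAL") or column.startswith("target_")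
--         is_weather = any(
--             column.startswith(prefix)
--             for prefix in [
--                 "precipitation",
--                 "temp_max",
--                 "temp_min",
--                 "wind_avg",
--                 "wind_speed_2m",
--                 "air_pressure",
--                 "air_temperature",
--                 "water_level",
--                 "water_temperature",
--                 "Watt_per_m2",
--                 "AWND",
--             ]
--         )
--         is_calendar = column.startswith("day_") or column in {"month", "quarter"}
--         is_week1_small_env = column.startswith(WEEK1_SMALL_ENV_COLUMNS)
--         is_week2_small_env = column.startswith(WEEK2_SMALL_ENV_COLUMNS)
--
--         if profile == "all":
--             selected.append(column)
--         elif profile == "target_weather_calendar" and (is_target or is_weather or is_calendar):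
--             selected.append(column)
--         elif profile == "target_calendar" and (is_target or is_calendar):
--             selected.append(column)
--         elif profile == "target_small_env_calendar" and (
--             is_target or is_week1_small_env or is_calendar
--         ):
--             selected.append(column)
--         elif profile == "target_small_env_calendar_p95":
--             if is_target or is_week1_small_env or is_calendar:
--                 if "_roll_iqr_" in column:
--                     continue
--                 selected.append(column)
--         elif profile == "target_small_env_week2_calendar_p95":
--             if is_target or is_week2_small_env or is_calendar:
--                 if "_roll_iqr_" in column:
--                     continue
--                 selected.append(column)
--         elif profile == "all_week3_pruned":
--             if any(column.startswith(prefix) for prefix in WEEK3_PRUNED_EXCLUDED_PREFIXES):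
--                 continue
--             selected.append(column)
--         elif profile == "all_week3_compact":
--             if any(column.startswith(prefix) for prefix in WEEK3_COMPACT_EXCLUDED_PREFIXES):
--                 continue
--             selected.append(column)
--
--     if not selected:
--         raise ValueError(f"Feature profile '{profile}' produced no columns.")
--     return selected
-- ===== SOURCE B (Python) =====
-- WEEK1_SMALL_ENV_COLUMNS = (
--     "precipitation",
--     "air_temperature",
--     "water_temperature",
--     "water_level",
-- )
--
-- WEEK2_SMALL_ENV_COLUMNS = WEEK1_SMALL_ENV_COLUMNS + ("Watt_per_m2", "AWND", "tidal_range")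
--
-- WEEK3_PRUNED_EXCLUDED_PREFIXES = (
--     "OWC",
--     "acdm_443",
--     "acdom_443",
--     "anw_443",
--     "aphy_443",
--     "bbp_443",
--     "bbp_slope",
--     "iop_flags",
--     "kd_490",
--     "target_delta_",
-- )
--
-- WEEK3_COMPACT_EXCLUDED_PREFIXES = WEEK3_PRUNED_EXCLUDED_PREFIXES + (
--     "Oa",
--     "A865",
--     "ADG443_NN",
--     "KD490_M07",
--     "PAR",
--     "TSM_NN",
--     "rho_665",
--     "rho_681",
--     "rho_709",
--     "IWV",
--     "total_pixels",
--     "valid_pixels",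
--     "CI_index",
-- )
--
-- _WEATHER_PREFIXES = (
--     "precipitation",
--     "temp_max",
--     "temp_min",
--     "wind_avg",
--     "wind_speed_2m",
--     "air_pressure",
--     "air_temperature",
--     "water_level",
--     "water_temperature",
--     "Watt_per_m2",
--     "AWND",
-- )
--
--
-- def _is_target(c: str) -> bool:
--     return c.startswith(("CHLL_NN_TOTAL", "target_"))
--
--
-- def _is_calendar(c: str) -> bool:
--     return c.startswith("day_") or c in ("month", "quarter")
--
--
-- def _is_weather(c: str) -> bool:
--     return c.startswith(_WEATHER_PREFIXES)
--
--
-- def _is_week1(c: str) -> bool: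
--     return c.startswith(WEEK1_SMALL_ENV_COLUMNS)
--
--
-- def _is_week2(c: str) -> bool:
--     return c.startswith(WEEK2_SMALL_ENV_COLUMNS)
--
--
-- def _has_roll_iqr(c: str) -> bool:
--     return "_roll_iqr_" in c
--
--
-- def _is_week3_pruned_excluded(c: str) -> bool:
--     return c.startswith(WEEK3_PRUNED_EXCLUDED_PREFIXES)
--
--
-- def _is_week3_compact_excluded(c: str) -> bool:
--     return c.startswith(WEEK3_COMPACT_EXCLUDED_PREFIXES)
--
--
-- _EVERYTHING = lambda c: True
--
-- # Per profile: (include stages, exclude stages). A column is kept iff some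
-- # include stage marks it and no exclude stage unmarks it.
-- _PROFILE_STAGES = {
--     "all": ([_EVERYTHING], []),
--     "target_weather_calendar": ([_is_target, _is_weather, _is_calendar], []),
--     "target_calendar": ([_is_target, _is_calendar], []),
--     "target_small_env_calendar": ([_is_target, _is_week1, _is_calendar], []),
--     "target_small_env_calendar_p95": ([_is_target, _is_week1, _is_calendar], [_has_roll_iqr]),
--     "target_small_env_week2_calendar_p95": ([_is_target, _is_week2, _is_calendar], [_has_roll_iqr]),
--     "all_week3_pruned": ([_EVERYTHING], [_is_week3_pruned_excluded]),
--     "all_week3_compact": ([_EVERYTHING], [_is_week3_compact_excluded]),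
-- }
--
--
-- def _feature_profile_columns(feature_columns: list[str], profile: str) -> list[str]:
--     include, exclude = _PROFILE_STAGES.get(profile, ([], []))
--     mask = [False] * len(feature_columns)
--     for pred in include:
--         mask = [m or pred(c) for m, c in zip(mask, feature_columns)]
--     for pred in exclude:
--         mask = [m and not pred(c) for m, c in zip(mask, feature_columns)]
--     selected = [c for c, m in zip(feature_columns, mask) if m]
--     if not selected:
--         raise ValueError(f"Feature profile '{profile}' produced no columns.")
--     return selected
-- ===== Notes on version B (the rewrite author's own statement) =====
-- stated objective: alternative
-- what changed: B replaces A's single pass with a per-column if/elif chain by staged passes over a boolean mask: the profile selects a list of include predicates and a list of exclude predicates, each applied in its own zip pass that marks/unmarks the mask, and a final pass extracts the masked columns.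
import Mathlib
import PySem

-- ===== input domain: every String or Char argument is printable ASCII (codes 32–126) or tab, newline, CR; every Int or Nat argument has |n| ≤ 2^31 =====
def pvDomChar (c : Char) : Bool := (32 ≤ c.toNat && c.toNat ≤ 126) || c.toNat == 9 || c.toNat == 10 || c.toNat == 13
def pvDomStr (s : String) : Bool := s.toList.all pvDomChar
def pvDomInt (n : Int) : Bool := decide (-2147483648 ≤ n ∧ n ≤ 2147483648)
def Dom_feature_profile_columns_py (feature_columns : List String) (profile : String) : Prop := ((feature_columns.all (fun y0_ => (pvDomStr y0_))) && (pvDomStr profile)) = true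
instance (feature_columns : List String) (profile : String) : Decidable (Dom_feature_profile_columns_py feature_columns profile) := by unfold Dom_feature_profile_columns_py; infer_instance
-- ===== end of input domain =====

-- B replaces A's single pass with per-column if/elif chain by staged passes over a boolean
-- mask (profile-selected include stages mark, exclude stages unmark, a final pass extracts
-- the masked columns); objective: alternative decomposition. Both raise ValueError when no
-- column is selected; Pre_ excludes exactly those inputs.

-- module-level prefix tuples shared by both Pythons (same-module constants)
def pvWeek1 : List String := ["precipitation", "air_temperature", "water_temperature", "water_level"]
def pvWeek2 : List String := pvWeek1 ++ ["Watt_per_m2", "AWND", "tidal_range"]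
def pvWeek3Pruned : List String :=
  ["OWC", "acdm_443", "acdom_443", "anw_443", "aphy_443", "bbp_443", "bbp_slope",
   "iop_flags", "kd_490", "target_delta_"]
def pvWeek3Compact : List String :=
  pvWeek3Pruned ++ ["Oa", "A865", "ADG443_NN", "KD490_M07", "PAR", "TSM_NN",
   "rho_665", "rho_681", "rho_709", "IWV", "total_pixels", "valid_pixels", "CI_index"]
def pvWeather : List String :=
  ["precipitation", "temp_max", "temp_min", "wind_avg", "wind_speed_2m", "air_pressure",
   "air_temperature", "water_level", "water_temperature", "Watt_per_m2", "AWND"]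

-- ===== PORT A =====
-- the body of A's `for column in feature_columns` loop, transliterated branch for branch
def pvABody (profile : String) (selected : List String) (column : String) : List String :=
  let is_target := PySem.Str.startswith column "CHLL_NN_TOTAL" || PySem.Str.startswith column "target_"
  let is_weather := pvWeather.any (fun p => PySem.Str.startswith column p)
  let is_calendar := PySem.Str.startswith column "day_" || (column == "month" || column == "quarter")
  let is_week1_small_env := pvWeek1.any (fun p => PySem.Str.startswith column p)
  let is_week2_small_env := pvWeek2.any (fun p => PySem.Str.startswith column p)
  if profile == "all" then selected ++ [column]
  else if profile == "target_weather_calendar" && (is_target || is_weather || is_calendar) then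
    selected ++ [column]
  else if profile == "target_calendar" && (is_target || is_calendar) then
    selected ++ [column]
  else if profile == "target_small_env_calendar" && (is_target || is_week1_small_env || is_calendar) then
    selected ++ [column]
  else if profile == "target_small_env_calendar_p95" then
    if is_target || is_week1_small_env || is_calendar then
      if PySem.Str.isIn "_roll_iqr_" column then selected  -- continue
      else selected ++ [column]
    else selected
  else if profile == "target_small_env_week2_calendar_p95" then
    if is_target || is_week2_small_env || is_calendar then
      if PySem.Str.isIn "_roll_iqr_" column then selected  -- continue
      else selected ++ [column]
    else selected
  else if profile == "all_week3_pruned" then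
    if pvWeek3Pruned.any (fun p => PySem.Str.startswith column p) then selected  -- continue
    else selected ++ [column]
  else if profile == "all_week3_compact" then
    if pvWeek3Compact.any (fun p => PySem.Str.startswith column p) then selected  -- continue
    else selected ++ [column]
  else selected

-- returns the `selected` list; the empty case (A raises ValueError) is excluded by Pre_
def feature_profile_columns_py (feature_columns : List String) (profile : String) : List String :=
  feature_columns.foldl (pvABody profile) []

-- ===== PORT B =====
def pvIsTarget (c : String) : Bool :=
  PySem.Str.startswith c "CHLL_NN_TOTAL" || PySem.Str.startswith c "target_"
def pvIsCalendar (c : String) : Bool :=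
  PySem.Str.startswith c "day_" || (c == "month" || c == "quarter")
def pvStartsAny (ps : List String) (c : String) : Bool :=
  ps.any (fun p => PySem.Str.startswith c p)
def pvIsWeather (c : String) : Bool := pvStartsAny pvWeather c
def pvIsWeek1 (c : String) : Bool := pvStartsAny pvWeek1 c
def pvIsWeek2 (c : String) : Bool := pvStartsAny pvWeek2 c
def pvHasRollIqr (c : String) : Bool := PySem.Str.isIn "_roll_iqr_" c
def pvIsW3Pruned (c : String) : Bool := pvStartsAny pvWeek3Pruned c
def pvIsW3Compact (c : String) : Bool := pvStartsAny pvWeek3Compact c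
def pvEverything (_c : String) : Bool := true

-- B's profile → (include stages, exclude stages) dispatch (the _PROFILE_STAGES dict,
-- with default ([], []))
def pvStages (profile : String) : List (String → Bool) × List (String → Bool) :=
  if profile == "all" then ([pvEverything], [])
  else if profile == "target_weather_calendar" then ([pvIsTarget, pvIsWeather, pvIsCalendar], [])
  else if profile == "target_calendar" then ([pvIsTarget, pvIsCalendar], [])
  else if profile == "target_small_env_calendar" then ([pvIsTarget, pvIsWeek1, pvIsCalendar], [])
  else if profile == "target_small_env_calendar_p95" then
    ([pvIsTarget, pvIsWeek1, pvIsCalendar], [pvHasRollIqr])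
  else if profile == "target_small_env_week2_calendar_p95" then
    ([pvIsTarget, pvIsWeek2, pvIsCalendar], [pvHasRollIqr])
  else if profile == "all_week3_pruned" then ([pvEverything], [pvIsW3Pruned])
  else if profile == "all_week3_compact" then ([pvEverything], [pvIsW3Compact])
  else ([], [])

def feature_profile_columns_py_alt (feature_columns : List String) (profile : String) : List String :=
  let st := pvStages profile
  let mask0 := List.replicate feature_columns.length false
  let mask1 := st.1.foldl
    (fun m pred => List.zipWith (fun mi c => mi || pred c) m feature_columns) mask0
  let mask2 := st.2.foldl
    (fun m pred => List.zipWith (fun mi c => mi && !pred c) m feature_columns) mask1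
  ((feature_columns.zip mask2).filter (fun p => p.2)).map (fun p => p.1)

-- ===== PRECONDITION & SPEC =====
-- pvKeep profile c: whether column c survives profile's rules (used only to state Pre_)
def pvKeep (profile : String) (c : String) : Bool :=
  if profile == "all" then true
  else if profile == "target_weather_calendar" then pvIsTarget c || pvIsWeather c || pvIsCalendar c
  else if profile == "target_calendar" then pvIsTarget c || pvIsCalendar c
  else if profile == "target_small_env_calendar" then pvIsTarget c || pvIsWeek1 c || pvIsCalendar c
  else if profile == "target_small_env_calendar_p95" then
    (pvIsTarget c || pvIsWeek1 c || pvIsCalendar c) && !pvHasRollIqr c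
  else if profile == "target_small_env_week2_calendar_p95" then
    (pvIsTarget c || pvIsWeek2 c || pvIsCalendar c) && !pvHasRollIqr c
  else if profile == "all_week3_pruned" then !pvIsW3Pruned c
  else if profile == "all_week3_compact" then !pvIsW3Compact c
  else false

-- Pre_ excludes exactly the inputs on which no column is kept: there A (and B) raises ValueError.
def Pre_feature_profile_columns_py (feature_columns : List String) (profile : String) : Prop :=
  (feature_columns.any (pvKeep profile)) = true
instance (feature_columns : List String) (profile : String) : Decidable (Pre_feature_profile_columns_py feature_columns profile) := by unfold Pre_feature_profile_columns_py; infer_instance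

def pvWitness_feature_profile_columns_py : List String × String := (["month", "OWC_x"], "all")

def Spec_feature_profile_columns_py (feature_columns : List String) (profile : String) (out : List String) : Prop := out = feature_profile_columns_py_alt feature_columns profile
instance (feature_columns : List String) (profile : String) (out : List String) : Decidable (Spec_feature_profile_columns_py feature_columns profile out) := by unfold Spec_feature_profile_columns_py; infer_instance

-- ===== CLAIM =====
def Claim_equal_feature_profile_columns_py : Prop := ∀ (feature_columns : List String) (profile : String), Dom_feature_profile_columns_py feature_columns profile → Pre_feature_profile_columns_py feature_columns profile → Spec_feature_profile_columns_py feature_columns profile (feature_profile_columns_py feature_columns profile)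

-- ===== LEMMAS AND PROOFS =====

-- A's loop body either appends the column or leaves `selected` alone, exactly as pvKeep decides
theorem pvABody_eq_keep (profile : String) (selected : List String) (column : String) :
    pvABody profile selected column =
      if pvKeep profile column then selected ++ [column] else selected := by
  unfold pvABody pvKeep pvIsTarget pvIsCalendar pvIsWeather pvIsWeek1 pvIsWeek2
    pvHasRollIqr pvIsW3Pruned pvIsW3Compact pvStartsAny
  by_cases h1 : profile = "all"
  · simp [h1]
  by_cases h2 : profile = "target_weather_calendar"
  · simp [h2]
  by_cases h3 : profile = "target_calendar"
  · simp [h3]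
  by_cases h4 : profile = "target_small_env_calendar"
  · simp [h4]
  by_cases h5 : profile = "target_small_env_calendar_p95"
  · simp [h5]; split_ifs <;> simp_all
  by_cases h6 : profile = "target_small_env_week2_calendar_p95"
  · simp [h6]; split_ifs <;> simp_all
  by_cases h7 : profile = "all_week3_pruned"
  · subst h7
    cases hA : pvWeek3Pruned.any (fun p => PySem.Str.startswith column p) <;> simp
  by_cases h8 : profile = "all_week3_compact"
  · subst h8
    cases hA : pvWeek3Compact.any (fun p => PySem.Str.startswith column p) <;> simp
  simp [h1, h2, h3, h4, h5, h6, h7, h8]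

-- A's loop accumulates exactly the pvKeep-filtered columns
theorem foldl_ABody_filter (profile : String) (fc : List String) (acc : List String) :
    fc.foldl (pvABody profile) acc = acc ++ fc.filter (pvKeep profile) := by
  induction fc generalizing acc with
  | nil => simp
  | cons c cs ih =>
    simp only [List.foldl_cons, ih, pvABody_eq_keep, List.filter_cons]
    split <;> simp

-- one zip pass over a mask of the form fc.map f is again a map over fc
theorem zipWith_map_self {α β : Type} (step : β → α → β) (f : α → β) (fc : List α) :
    List.zipWith (fun mi c => step mi c) (fc.map f) fc = fc.map (fun c => step (f c) c) := by
  induction fc with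
  | nil => rfl
  | cons c cs ih => simp [ih]

-- folding a list of stage passes over a mapped mask stays a mapped mask
theorem foldl_stages_map {α : Type} (g : Bool → Bool → Bool) (ps : List (α → Bool))
    (fc : List α) (f : α → Bool) :
    ps.foldl (fun m pred => List.zipWith (fun mi c => g mi (pred c)) m fc) (fc.map f)
      = fc.map (fun c => ps.foldl (fun b p => g b (p c)) (f c)) := by
  induction ps generalizing f with
  | nil => rfl
  | cons p ps ih =>
    simp only [List.foldl_cons]
    rw [zipWith_map_self (fun mi c => g mi (p c)) f fc, ih]

-- extracting the columns whose mask entry is true is a filter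
theorem zip_mask_filter {α : Type} (k : α → Bool) (fc : List α) :
    ((fc.zip (fc.map k)).filter (fun p => p.2)).map (fun p => p.1) = fc.filter k := by
  induction fc with
  | nil => rfl
  | cons c cs ih =>
    simp only [List.map_cons, List.zip_cons_cons, List.filter_cons]
    cases h : k c <;> simp [h, ih]

-- B computes the pvKeep filter
theorem alt_eq_filter (fc : List String) (profile : String) :
    feature_profile_columns_py_alt fc profile = fc.filter (pvKeep profile) := by
  unfold feature_profile_columns_py_alt
  have hrep : List.replicate fc.length false = fc.map (fun _ => false) := by
    simp
  simp only [hrep, foldl_stages_map (fun b x => b || x),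
    foldl_stages_map (fun b x => b && !x), zip_mask_filter]
  apply List.filter_congr
  intro c _
  unfold pvStages pvKeep
  by_cases h1 : profile = "all"
  · simp [h1, pvEverything]
  by_cases h2 : profile = "target_weather_calendar"
  · simp [h2]
  by_cases h3 : profile = "target_calendar"
  · simp [h3]
  by_cases h4 : profile = "target_small_env_calendar"
  · simp [h4]
  by_cases h5 : profile = "target_small_env_calendar_p95"
  · simp [h5, Bool.or_assoc]
  by_cases h6 : profile = "target_small_env_week2_calendar_p95"
  · simp [h6, Bool.or_assoc]
  by_cases h7 : profile = "all_week3_pruned"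
  · simp [h7, pvEverything]
  by_cases h8 : profile = "all_week3_compact"
  · simp [h8, pvEverything]
  simp [h1, h2, h3, h4, h5, h6, h7, h8]

-- ===== VERDICT =====
theorem feature_profile_columns_py_spec : Claim_equal_feature_profile_columns_py := by
  intro fc profile _ _
  unfold Spec_feature_profile_columns_py feature_profile_columns_py
  rw [alt_eq_filter]
  simpa using foldl_ABody_filter profile fc []
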